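-- pv_equiv track=rewrite | github.com/ghmulti/advent | day10/day10.py | build_subgroups
-- ===== SOURCE A (Python) =====
-- def build_subgroups(joltage_with_outlet):
--     group = []
--     for k,v in enumerate(joltage_with_outlet):
--         diff = v - joltage_with_outlet[k-1]
--         if diff >= 3:
--             yield group
--             group = [v]
--         else:
--             group.append(v)
--     yield group
-- ===== SOURCE B (Python) =====
-- def build_subgroups(joltage_with_outlet):
--     n = len(joltage_with_outlet)
--     splits = [k for k in range(n)
--               if joltage_with_outlet[k] - joltage_with_outlet[k - 1] >= 3]
--     boundaries = [0] + splits + [n]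
--     for b, c in zip(boundaries, boundaries[1:]):
--         yield joltage_with_outlet[b:c]
-- ===== Notes on version B (the rewrite author's own statement) =====
-- stated objective: alternative
-- what changed: Replaces the single stateful accumulate-and-flush loop by two passes: first collect the split indices where the (wrapping) difference is >= 3, then yield slices between consecutive boundaries.
import Mathlib
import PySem

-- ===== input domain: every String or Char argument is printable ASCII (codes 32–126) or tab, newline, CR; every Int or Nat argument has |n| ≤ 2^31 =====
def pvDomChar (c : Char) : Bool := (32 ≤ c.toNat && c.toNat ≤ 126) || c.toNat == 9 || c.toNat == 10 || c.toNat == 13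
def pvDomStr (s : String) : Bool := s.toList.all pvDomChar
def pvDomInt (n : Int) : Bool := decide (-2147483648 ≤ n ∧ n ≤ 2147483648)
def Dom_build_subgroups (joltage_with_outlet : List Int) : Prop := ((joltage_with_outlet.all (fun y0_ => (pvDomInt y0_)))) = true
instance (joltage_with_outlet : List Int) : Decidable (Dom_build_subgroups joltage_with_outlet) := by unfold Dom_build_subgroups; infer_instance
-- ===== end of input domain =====

-- B splits by two passes (collect split indices, then slice between boundaries) instead of A's
-- stateful accumulate-and-flush generator loop; same cost, different decomposition.
-- (Both are Python generators; equivalence is about the yielded sequence of groups.)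

-- ===== PORT A =====
def build_subgroups (joltage_with_outlet : List Int) : List (List Int) :=
  let st := (PySem.List.enumerate joltage_with_outlet 0).foldl
    (fun (st : List (List Int) × List Int) kv =>
      let diff := kv.2 - PySem.List.pyGetD joltage_with_outlet (kv.1 - 1) 0
      if 3 ≤ diff then (st.1 ++ [st.2], [kv.2]) else (st.1, st.2 ++ [kv.2]))
    ([], [])
  st.1 ++ [st.2]

-- ===== PORT B =====
def build_subgroups_alt (joltage_with_outlet : List Int) : List (List Int) :=
  let n : Int := joltage_with_outlet.length
  let splits := (PySem.List.pyRange 0 n 1).filter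
    (fun k => 3 ≤ PySem.List.pyGetD joltage_with_outlet k 0
                  - PySem.List.pyGetD joltage_with_outlet (k - 1) 0)
  let boundaries := 0 :: (splits ++ [n])
  (boundaries.zip boundaries.tail).map
    (fun bc => PySem.List.slice joltage_with_outlet (some bc.1) (some bc.2))

-- ===== PRECONDITION & SPEC =====
def Spec_build_subgroups (joltage_with_outlet : List Int) (out : List (List Int)) : Prop := out = build_subgroups_alt joltage_with_outlet
instance (joltage_with_outlet : List Int) (out : List (List Int)) : Decidable (Spec_build_subgroups joltage_with_outlet out) := by unfold Spec_build_subgroups; infer_instance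

-- ===== CLAIM (what is proved, stated in full; the proofs are below) =====
def Claim_equal_build_subgroups : Prop := ∀ (joltage_with_outlet : List Int), Dom_build_subgroups joltage_with_outlet → Spec_build_subgroups joltage_with_outlet (build_subgroups joltage_with_outlet)

-- ===== LEMMAS AND PROOFS =====

/-- l[k] (Python, with wraparound for -1) with default 0 -/
def pvGet (l : List Int) (k : Int) : Int := PySem.List.pyGetD l k 0

/-- Recursive characterisation of the grouping over a list of indices. -/
def pvGr (l : List Int) : List Int → List Int → List (List Int)
  | [], g => [g]
  | k :: ks, g =>
      if 3 ≤ pvGet l k - pvGet l (k - 1) then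
        g :: pvGr l ks [pvGet l k]
      else
        pvGr l ks (g ++ [pvGet l k])

/-- A's fold equals the recursive characterisation. -/
theorem pvA_gr (l : List Int) (ks : List Int) (acc : List (List Int)) (g : List Int) :
    (ks.foldl
      (fun (st : List (List Int) × List Int) j =>
        if 3 ≤ pvGet l j - pvGet l (j - 1) then (st.1 ++ [st.2], [pvGet l j])
        else (st.1, st.2 ++ [pvGet l j])) (acc, g)).1
    ++ [(ks.foldl
      (fun (st : List (List Int) × List Int) j =>
        if 3 ≤ pvGet l j - pvGet l (j - 1) then (st.1 ++ [st.2], [pvGet l j])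
        else (st.1, st.2 ++ [pvGet l j])) (acc, g)).2]
    = acc ++ pvGr l ks g := by
  induction ks generalizing acc g with
  | nil => simp [pvGr]
  | cons k ks ih =>
    simp only [List.foldl_cons, pvGr]
    split_ifs with h
    · rw [ih]; simp
    · rw [ih]

/-- Slices between consecutive boundaries. -/
def pvSlices (l : List Int) : List Int → List (List Int)
  | [] => []
  | [_] => []
  | a :: b :: rest => PySem.List.slice l (some a) (some b) :: pvSlices l (b :: rest)

theorem pvZip_slices (l : List Int) (bs : List Int) :
    ((bs.zip bs.tail).map (fun bc => PySem.List.slice l (some bc.1) (some bc.2)))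
      = pvSlices l bs := by
  induction bs with
  | nil => simp [pvSlices]
  | cons a bs ih =>
    cases bs with
    | nil => simp [pvSlices]
    | cons b rest =>
      simp only [List.tail_cons, List.zip_cons_cons, List.map_cons, pvSlices]
      simpa using ih

/-- pvGet at a natural in-range index is getElem. -/
theorem pvGet_nat (l : List Int) (s : ℕ) (h : s < l.length) :
    pvGet l (s : Int) = l[s] := by
  simp [pvGet, PySem.List.pyGetD_natCast, List.getD_eq_getElem?_getD,
    List.getElem?_eq_getElem h]

/-- A one-element slice. -/
theorem pvSlice_single (l : List Int) (s : ℕ) (h : s < l.length) :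
    PySem.List.slice l (some (s : Int)) (some ((s + 1 : ℕ) : Int)) = [l[s]] := by
  rw [PySem.List.slice_natCast, List.drop_eq_getElem_cons h]
  have e : s + 1 - s = 1 := by omega
  rw [e]
  rfl

/-- Extending a slice by one element on the right. -/
theorem pvSlice_snoc (l : List Int) (b s : ℕ) (hb : b ≤ s) (h : s < l.length) :
    PySem.List.slice l (some (b : Int)) (some ((s + 1 : ℕ) : Int))
      = PySem.List.slice l (some (b : Int)) (some (s : Int)) ++ [l[s]] := by
  rw [PySem.List.slice_natCast, PySem.List.slice_natCast]
  have h1 : s + 1 - b = (s - b) + 1 := by omega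
  rw [h1, List.take_add_one, List.getElem?_drop]
  have h2 : b + (s - b) = s := by omega
  rw [h2, List.getElem?_eq_getElem h]
  simp

/-- B's boundary slices equal the recursive characterisation, over range s..n. -/
theorem pvB_gr (l : List Int) (m : ℕ) : ∀ (s b : ℕ), s + m = l.length → b ≤ s →
    pvSlices l ((b : Int) ::
      ((PySem.List.pyRange s l.length 1).filter
        (fun k => 3 ≤ pvGet l k - pvGet l (k - 1)) ++ [(l.length : Int)]))
    = pvGr l (PySem.List.pyRange s l.length 1)
        (PySem.List.slice l (some (b : Int)) (some (s : Int))) := by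
  induction m with
  | zero =>
    intro s b hs hb
    rw [PySem.List.pyRange_one_eq_nil (by omega)]
    simp only [List.filter_nil, List.nil_append, pvSlices, pvGr]
    have : s = l.length := by omega
    subst this; rfl
  | succ m ih =>
    intro s b hs hb
    have hlt : s < l.length := by omega
    have hsn : (s : Int) < (l.length : Int) := by omega
    have e1 : (s : Int) + 1 = ((s + 1 : ℕ) : Int) := by push_cast; ring
    rw [PySem.List.pyRange_one_cons hsn, e1]
    by_cases h : 3 ≤ pvGet l (s : Int) - pvGet l ((s : Int) - 1)
    · simp only [List.filter_cons, h, decide_true, if_true, List.cons_append, pvSlices, pvGr]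
      rw [ih (s + 1) s (by omega) (by omega), pvSlice_single l s hlt, pvGet_nat l s hlt]
    · simp only [List.filter_cons, h, decide_false, Bool.false_eq_true, if_false, pvGr]
      rw [ih (s + 1) b (by omega) (by omega), pvSlice_snoc l b s hb hlt,
        pvGet_nat l s hlt]

-- ===== VERDICT (by name: the statement is the Claim_ definition above) =====
theorem build_subgroups_spec : Claim_equal_build_subgroups := by
  intro l _
  show build_subgroups l = build_subgroups_alt l
  unfold build_subgroups build_subgroups_alt
  rw [PySem.List.enumerate_eq_map_pyRange l 0, List.foldl_map]
  simp only [PySem.List.len]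
  rw [pvZip_slices]
  have hA := pvA_gr l (PySem.List.pyRange 0 l.length 1) [] []
  have hB := pvB_gr l l.length 0 0 (by omega) (by omega)
  have hz : PySem.List.slice l (some ((0:ℕ) : Int)) (some ((0:ℕ) : Int)) = [] := by
    rw [PySem.List.slice_natCast]; simp
  rw [hz] at hB
  simp only [pvGet, Nat.cast_zero, List.nil_append] at hA hB
  rw [hA]
  exact hB.symm
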